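-- pv_equiv track=rewrite | github.com/CarmelitaBraga/code-and-about | practicing-codes/p1/sim5/u6/5536473757515776/solution.py | quantos_comeram
-- ===== SOURCE A (Python) =====
-- def quantos_comeram(N, fila_pedidos):
--     serv = 0
--
--     for pedido in fila_pedidos:
--         if N >= pedido:
--             serv += pedido
--             N = N - pedido
--         else: break
--
--     return serv
-- ===== SOURCE B (Python) =====
-- def quantos_comeram(N, fila_pedidos):
--     # Stage 1: build the complete prefix-sum table (no early exit, no mutable budget).
--     prefix = [0]
--     for p in fila_pedidos:
--         prefix.append(prefix[-1] + p)
--     # Stage 2: the first prefix sum that overflows N marks the cut; answer is the one before it.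
--     for i in range(1, len(prefix)):
--         if prefix[i] > N:
--             return prefix[i - 1]
--     return prefix[-1]
-- ===== Notes on version B (the rewrite author's own statement) =====
-- stated objective: alternative
-- what changed: B replaces A's single short-circuiting loop with a mutable budget by two staged passes: it first materialises the full prefix-sum table of the whole queue, then scans that table for the first sum exceeding N and returns the entry just before it (or the last entry if none overflows).
import Mathlib
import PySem

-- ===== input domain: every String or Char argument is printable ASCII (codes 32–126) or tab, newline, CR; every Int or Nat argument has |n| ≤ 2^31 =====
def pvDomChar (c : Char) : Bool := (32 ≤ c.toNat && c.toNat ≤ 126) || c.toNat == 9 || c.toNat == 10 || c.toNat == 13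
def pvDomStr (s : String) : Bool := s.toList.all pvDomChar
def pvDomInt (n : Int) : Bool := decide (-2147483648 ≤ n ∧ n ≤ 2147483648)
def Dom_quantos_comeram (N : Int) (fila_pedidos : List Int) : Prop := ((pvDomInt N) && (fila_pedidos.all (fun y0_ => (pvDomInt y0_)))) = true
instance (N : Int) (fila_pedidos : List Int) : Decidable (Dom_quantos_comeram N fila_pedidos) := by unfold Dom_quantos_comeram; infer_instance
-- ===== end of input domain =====

-- B replaces A's short-circuiting budget loop by two staged passes: build the full prefix-sum table, then scan it for the first overflow (alternative decomposition, same O(n) cost).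


-- ===== PORT A =====
-- for-loop with break: state (N, serv), stop at the first pedido with N < pedido
def quantos_comeram_go (N : Int) (serv : Int) : List Int → Int
  | [] => serv
  | p :: rest => if N ≥ p then quantos_comeram_go (N - p) (serv + p) rest else serv

def quantos_comeram (N : Int) (fila_pedidos : List Int) : Int :=
  quantos_comeram_go N 0 fila_pedidos

-- ===== PORT B =====
-- stage 1: the prefix-sum table starting at c (prefix = [0]; for p: prefix.append(prefix[-1]+p))
def quantos_comeram_prefix (c : Int) : List Int → List Int
  | [] => [c]
  | p :: rest => c :: quantos_comeram_prefix (c + p) rest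

-- stage 2: scan the table (from index 1, prev = entry 0) for the first entry > N
def quantos_comeram_scan (N : Int) (prev : Int) : List Int → Int
  | [] => prev
  | c :: rest => if c > N then prev else quantos_comeram_scan N c rest

def quantos_comeram_alt (N : Int) (fila_pedidos : List Int) : Int :=
  quantos_comeram_scan N 0 ((quantos_comeram_prefix 0 fila_pedidos).drop 1)

-- ===== PRECONDITION & SPEC =====
def Spec_quantos_comeram (N : Int) (fila_pedidos : List Int) (out : Int) : Prop := out = quantos_comeram_alt N fila_pedidos
instance (N : Int) (fila_pedidos : List Int) (out : Int) : Decidable (Spec_quantos_comeram N fila_pedidos out) := by unfold Spec_quantos_comeram; infer_instance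

-- ===== CLAIM (what is proved, stated in full; the proofs are below) =====
def Claim_equal_quantos_comeram : Prop := ∀ (N : Int) (fila_pedidos : List Int), Dom_quantos_comeram N fila_pedidos → Spec_quantos_comeram N fila_pedidos (quantos_comeram N fila_pedidos)

-- ===== LEMMAS AND PROOFS =====
theorem quantos_comeram_prefix_cons (c : Int) (xs : List Int) :
    quantos_comeram_prefix c xs = c :: (quantos_comeram_prefix c xs).drop 1 := by
  cases xs <;> simp [quantos_comeram_prefix]

theorem quantos_comeram_go_eq (xs : List Int) : ∀ (N s : Int),
    quantos_comeram_go N s xs = quantos_comeram_scan (s + N) s ((quantos_comeram_prefix s xs).drop 1) := by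
  induction xs with
  | nil => intro N s; simp [quantos_comeram_go, quantos_comeram_prefix, quantos_comeram_scan]
  | cons p rest ih =>
    intro N s
    simp only [quantos_comeram_go, quantos_comeram_prefix, List.drop_succ_cons, List.drop_zero]
    rw [quantos_comeram_prefix_cons (s + p) rest]
    simp only [quantos_comeram_scan]
    by_cases h : N ≥ p
    · rw [if_pos h, if_neg (by omega)]
      have := ih (N - p) (s + p)
      rw [show s + p + (N - p) = s + N by ring] at this
      exact this
    · rw [if_neg h, if_pos (by omega)]

-- ===== VERDICT (by name: the statement is the Claim_ definition above) =====
theorem quantos_comeram_spec : Claim_equal_quantos_comeram := by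
  intro N xs _
  unfold Spec_quantos_comeram quantos_comeram quantos_comeram_alt
  simpa using quantos_comeram_go_eq xs N 0
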